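-- pv_equiv track=rewrite | github.com/GitHub-User228/recommendation_system_service | services/ml_service/scripts/utils.py | get_top_k_items
-- ===== SOURCE A (Python) =====
-- from collections import deque
-- from typing import Dict, Any, List
--
-- def get_top_k_items(item_lists: List[List[int]], K: int) -> List[int]:
--     """
--     Retrieves top K items in circular order given a list of item lists
--     preserving the order of the original lists.
--
--     Parameters:
--         item_lists (List[List[int]]):
--             List of lists with item IDs.
--         K (int):
--             Number of top items to retrieve.
--
--     Returns:
--         list:
--             List of top K item IDs.
--     """
--
--     queues = [deque(lst) for lst in item_lists]
--
--     recommendations = []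
--     while len(recommendations) < K and any(queues):
--         for q in queues:
--             if q and len(recommendations) < K:
--                 recommendations.append(q.popleft())
--
--     return recommendations
-- ===== SOURCE B (Python) =====
-- def get_top_k_items(item_lists, K):
--     if K <= 0:
--         return []
--     n = max(map(len, item_lists), default=0)
--     flat = [lst[i] for i in range(n) for lst in item_lists if i < len(lst)]
--     return flat[:K]
-- ===== Notes on version B (the rewrite author's own statement) =====
-- stated objective: simpler
-- what changed: Replaces A's mutable-deque while-loop that pops heads round by round with a single column-wise (transposed) flattening comprehension truncated to K.
import Mathlib
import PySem

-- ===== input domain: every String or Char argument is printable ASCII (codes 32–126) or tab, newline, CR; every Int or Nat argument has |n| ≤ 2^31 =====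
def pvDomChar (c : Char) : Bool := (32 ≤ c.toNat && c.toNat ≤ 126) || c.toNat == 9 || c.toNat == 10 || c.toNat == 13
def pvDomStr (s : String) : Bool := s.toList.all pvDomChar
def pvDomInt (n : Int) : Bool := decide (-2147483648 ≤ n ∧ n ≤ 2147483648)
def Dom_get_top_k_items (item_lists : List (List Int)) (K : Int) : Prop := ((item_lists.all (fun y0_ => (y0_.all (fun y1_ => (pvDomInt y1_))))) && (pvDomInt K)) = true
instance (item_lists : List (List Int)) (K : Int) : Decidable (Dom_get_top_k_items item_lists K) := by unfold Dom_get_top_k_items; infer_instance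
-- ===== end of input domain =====

-- B replaces A's mutable-deque round-robin while-loop by a transposed (column-wise)
-- flattening comprehension truncated to K; objective: simpler.

-- ===== PORT A =====
-- total number of queued items; used only as sufficient fuel for A's while-loop
def pvSumLen (qs : List (List Int)) : Nat := (qs.map List.length).sum

-- one step of the `for q in queues` body: pop the head if q nonempty and len(rec) < K
def pvStep (K : Int) (acc : List (List Int) × List Int) (q : List Int) : List (List Int) × List Int :=
  match q with
  | [] => (acc.1 ++ [[]], acc.2)
  | x :: xs =>
    if (acc.2.length : Int) < K then (acc.1 ++ [xs], acc.2 ++ [x])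
    else (acc.1 ++ [x :: xs], acc.2)

-- the while-loop; each iteration pops at least one item, so fuel pvSumLen+1 suffices
def pvLoopA (K : Int) : Nat → List (List Int) → List Int → List Int
  | 0, _, rec => rec
  | fuel + 1, queues, rec =>
    if (rec.length : Int) < K ∧ queues.any (fun q => !q.isEmpty) then
      let p := queues.foldl (pvStep K) ([], rec)
      pvLoopA K fuel p.1 p.2
    else rec

def get_top_k_items (item_lists : List (List Int)) (K : Int) : List Int :=
  pvLoopA K (pvSumLen item_lists + 1) item_lists []

-- ===== PORT B =====
-- column i of item_lists: [lst[i] for lst in item_lists if i < len(lst)]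
def pvCol (item_lists : List (List Int)) (i : Nat) : List Int :=
  item_lists.filterMap (fun l => if i < l.length then some (l.getD i 0) else none)

def get_top_k_items_alt (item_lists : List (List Int)) (K : Int) : List Int :=
  if K ≤ 0 then []
  else
    let n := (item_lists.map List.length).foldl max 0
    let flat := (List.range n).flatMap (fun i => pvCol item_lists i)
    flat.take K.toNat

-- ===== PRECONDITION & SPEC =====
def Spec_get_top_k_items (item_lists : List (List Int)) (K : Int) (out : List Int) : Prop := out = get_top_k_items_alt item_lists K
instance (item_lists : List (List Int)) (K : Int) (out : List Int) : Decidable (Spec_get_top_k_items item_lists K out) := by unfold Spec_get_top_k_items; infer_instance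

-- ===== CLAIM (what is proved, stated in full; the proofs are below) =====
def Claim_equal_get_top_k_items : Prop := ∀ (item_lists : List (List Int)) (K : Int), Dom_get_top_k_items item_lists K → Spec_get_top_k_items item_lists K (get_top_k_items item_lists K)

-- ===== LEMMAS AND PROOFS =====


-- common reference form: column-wise flatten, fuelled
def colFlatF : Nat → List (List Int) → List Int
  | 0, _ => []
  | n + 1, qs =>
    if qs.any (fun q => !q.isEmpty) then
      qs.filterMap List.head? ++ colFlatF n (qs.map List.tail)
    else []

-- queues after one round with budget b
def roundTails : Nat → List (List Int) → List (List Int)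
  | _, [] => []
  | b, [] :: qs => [] :: roundTails b qs
  | 0, (x :: xs) :: qs => (x :: xs) :: roundTails 0 qs
  | b + 1, (_ :: xs) :: qs => xs :: roundTails b qs

lemma anyNE_iff (qs : List (List Int)) :
    qs.any (fun q => !q.isEmpty) = true ↔ pvSumLen qs ≠ 0 := by
  induction qs with
  | nil => simp [pvSumLen]
  | cons q qs ih =>
    cases q <;> simp [pvSumLen, List.any_cons, ih, pvSumLen] at *

lemma heads_len_pos (qs : List (List Int)) (h : qs.any (fun q => !q.isEmpty) = true) :
    1 ≤ (qs.filterMap List.head?).length := by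
  induction qs with
  | nil => simp at h
  | cons q qs ih =>
    cases q with
    | nil =>
      simp only [List.any_cons] at h
      have h2 : qs.any (fun q => !q.isEmpty) = true := by simpa using h
      simpa using ih h2
    | cons x xs => simp

lemma sumLen_tails (qs : List (List Int)) :
    pvSumLen (qs.map List.tail) + (qs.filterMap List.head?).length = pvSumLen qs := by
  induction qs with
  | nil => simp [pvSumLen]
  | cons q qs ih => cases q <;> simp [pvSumLen] at * <;> omega

lemma sumLen_roundTails (b : Nat) (qs : List (List Int)) :
    pvSumLen (roundTails b qs) + min b (qs.filterMap List.head?).length = pvSumLen qs := by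
  induction qs generalizing b with
  | nil => simp [roundTails, pvSumLen]
  | cons q qs ih =>
    cases q with
    | nil => simpa [roundTails, pvSumLen] using ih b
    | cons x xs =>
      cases b with
      | zero => have := ih 0; simp [roundTails, pvSumLen] at *; omega
      | succ b => have := ih b; simp [roundTails, pvSumLen] at *; omega

lemma roundTails_all (b : Nat) (qs : List (List Int))
    (h : (qs.filterMap List.head?).length ≤ b) :
    roundTails b qs = qs.map List.tail := by
  induction qs generalizing b with
  | nil => simp [roundTails]
  | cons q qs ih =>
    cases q with
    | nil => simp [roundTails]; exact ih b (by simpa using h)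
    | cons x xs =>
      cases b with
      | zero => simp at h
      | succ b => simp [roundTails]; exact ih b (by simp at h; omega)

lemma colFlatF_fuel (m n : Nat) (qs : List (List Int))
    (hm : pvSumLen qs ≤ m) (hn : pvSumLen qs ≤ n) :
    colFlatF m qs = colFlatF n qs := by
  induction m generalizing n qs with
  | zero =>
    cases n with
    | zero => rfl
    | succ n =>
      have : qs.any (fun q => !q.isEmpty) = false := by
        rw [Bool.eq_false_iff, Ne, anyNE_iff]; omega
      simp [colFlatF, this]
  | succ m ih =>
    cases n with
    | zero =>
      have : qs.any (fun q => !q.isEmpty) = false := by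
        rw [Bool.eq_false_iff, Ne, anyNE_iff]; omega
      simp [colFlatF, this]
    | succ n =>
      by_cases h : qs.any (fun q => !q.isEmpty) = true
      · have h1 := heads_len_pos qs h
        have h2 := sumLen_tails qs
        simp only [colFlatF, h, if_true]
        rw [ih n (qs.map List.tail) (by omega) (by omega)]
      · have h' : qs.any (fun q => !q.isEmpty) = false := Bool.eq_false_iff.mpr h
        simp [colFlatF, h']

lemma round_fold (K : Int) (qs : List (List Int)) (pre : List (List Int)) (rec : List Int) :
    qs.foldl (pvStep K) (pre, rec) =
      (pre ++ roundTails (K.toNat - rec.length) qs,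
       rec ++ (qs.filterMap List.head?).take (K.toNat - rec.length)) := by
  induction qs generalizing pre rec with
  | nil => simp [roundTails]
  | cons q qs ih =>
    cases q with
    | nil => simp [pvStep, roundTails, ih]
    | cons x xs =>
      by_cases h : (rec.length : Int) < K
      · have hb : K.toNat - rec.length = (K.toNat - (rec.length + 1)) + 1 := by omega
        simp only [List.foldl_cons, pvStep, h, if_true, ih]
        rw [hb]
        simp [roundTails, List.take_succ_cons]
      · have hb : K.toNat - rec.length = 0 := by omega
        simp only [List.foldl_cons, pvStep, h, if_false, ih]
        simp [hb, roundTails]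

lemma loopA_eq (K : Int) (fuel : Nat) (qs : List (List Int)) (rec : List Int)
    (hf : pvSumLen qs < fuel) :
    pvLoopA K fuel qs rec = rec ++ (colFlatF (pvSumLen qs) qs).take (K.toNat - rec.length) := by
  induction fuel generalizing qs rec with
  | zero => omega
  | succ fuel ih =>
    by_cases hc : (rec.length : Int) < K ∧ qs.any (fun q => !q.isEmpty) = true
    · obtain ⟨h1, h2⟩ := hc
      have hcond : (rec.length : Int) < K ∧ qs.any (fun q => !q.isEmpty) = true := ⟨h1, h2⟩
      have hb : 1 ≤ K.toNat - rec.length := by omega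
      set b := K.toNat - rec.length with hbdef
      set ℓ := (qs.filterMap List.head?).length with hl
      have hl1 : 1 ≤ ℓ := heads_len_pos qs h2
      have hs0 : pvSumLen qs ≠ 0 := (anyNE_iff qs).mp h2
      obtain ⟨s, hs⟩ : ∃ s, pvSumLen qs = s + 1 := ⟨pvSumLen qs - 1, by omega⟩
      have hsr := sumLen_roundTails b qs
      have hst := sumLen_tails qs
      rw [show pvLoopA K (fuel + 1) qs rec =
            (if (rec.length : Int) < K ∧ qs.any (fun q => !q.isEmpty) = true then
              let p := qs.foldl (pvStep K) ([], rec)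
              pvLoopA K fuel p.1 p.2
            else rec) from rfl,
          if_pos hcond]
      rw [round_fold]
      simp only [List.nil_append, ← hbdef]
      by_cases hbl : b ≤ ℓ
      · -- budget exhausted within this round
        have hlen : (rec ++ (qs.filterMap List.head?).take b).length = rec.length + b := by
          simp [← hl]; omega
        rw [ih _ _ (by omega)]
        have h0 : K.toNat - (rec ++ (qs.filterMap List.head?).take b).length = 0 := by
          rw [hlen]; omega
        rw [h0]
        simp only [List.take_zero, List.append_nil]
        congr 1
        rw [hs]
        simp only [colFlatF, h2, if_true]
        rw [List.take_append, ← hl, show b - ℓ = 0 from by omega]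
        simp
      · -- whole column taken
        have hrt : roundTails b qs = qs.map List.tail := roundTails_all b qs (by omega)
        have hlen : (rec ++ (qs.filterMap List.head?).take b).length = rec.length + ℓ := by
          simp [← hl]; omega
        rw [hrt, ih _ _ (by omega), hlen]
        have hb2 : K.toNat - (rec.length + ℓ) = b - ℓ := by omega
        rw [hb2, hs]
        simp only [colFlatF, h2, if_true, List.append_assoc]
        congr 1
        rw [List.take_append, ← hl,
            List.take_of_length_le (l := qs.filterMap List.head?) (by omega),
            colFlatF_fuel s (pvSumLen (qs.map List.tail)) (qs.map List.tail) (by omega) (le_refl _)]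
    · rw [show pvLoopA K (fuel + 1) qs rec =
            (if (rec.length : Int) < K ∧ qs.any (fun q => !q.isEmpty) = true then
              let p := qs.foldl (pvStep K) ([], rec)
              pvLoopA K fuel p.1 p.2
            else rec) from rfl,
          if_neg hc]
      by_cases h1 : (rec.length : Int) < K
      · have h2 : qs.any (fun q => !q.isEmpty) = false := by
          cases hB : qs.any (fun q => !q.isEmpty) with
          | false => rfl
          | true => exact absurd ⟨h1, hB⟩ hc
        have hz : pvSumLen qs = 0 := by
          by_contra hnz
          exact absurd ((anyNE_iff qs).mpr hnz) (by simp [h2])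
        rw [hz]; simp [colFlatF]
      · have h0 : K.toNat - rec.length = 0 := by omega
        simp [h0]

-- B-side: the range-flatMap of columns equals the fuelled column flatten
lemma heads_nil (qs : List (List Int)) (h : qs.any (fun q => !q.isEmpty) = false) :
    qs.filterMap List.head? = [] := by
  induction qs with
  | nil => rfl
  | cons q qs ih =>
    simp only [List.any_cons, Bool.or_eq_false_iff] at h
    cases q with
    | nil => simpa using ih h.2
    | cons x xs => simp at h

lemma col_zero (qs : List (List Int)) : pvCol qs 0 = qs.filterMap List.head? := by
  induction qs with
  | nil => rfl
  | cons q qs ih => cases q <;> simp [pvCol] at * <;> simp [ih]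

lemma col_succ (qs : List (List Int)) (i : Nat) :
    pvCol qs (i + 1) = pvCol (qs.map List.tail) i := by
  induction qs with
  | nil => rfl
  | cons q qs ih =>
    simp only [pvCol, List.map_cons, List.filterMap_cons] at ih ⊢
    have hq : (if i + 1 < q.length then some (q.getD (i + 1) 0) else none)
        = (if i < q.tail.length then some (q.tail.getD i 0) else none) := by
      cases q with
      | nil => simp
      | cons x xs =>
        simp only [List.length_cons, List.tail_cons]
        by_cases h : i < xs.length
        · rw [if_pos (by omega), if_pos h, List.getD_cons_succ]
        · rw [if_neg (by omega), if_neg h]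
    rw [hq, ih]

lemma flatRange_eq (n : Nat) (qs : List (List Int))
    (h : ∀ l ∈ qs, l.length ≤ n) :
    (List.range n).flatMap (fun i => pvCol qs i) = colFlatF (pvSumLen qs) qs := by
  induction n generalizing qs with
  | zero =>
    have hz : pvSumLen qs = 0 := by
      induction qs with
      | nil => rfl
      | cons q qs ih =>
        have hq := h q (by simp)
        have ht : pvSumLen qs = 0 := ih (fun l hl => h l (by simp [hl]))
        simp only [pvSumLen, List.map_cons, List.sum_cons]
        simp only [pvSumLen] at ht
        omega
    rw [hz]; simp [colFlatF]
  | succ n ih =>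
    have htail : ∀ l ∈ qs.map List.tail, l.length ≤ n := by
      intro l hl
      simp only [List.mem_map] at hl
      obtain ⟨l', hl', rfl⟩ := hl
      have := h l' hl'
      cases l' with
      | nil => simp
      | cons a as => simp at this ⊢; omega
    rw [List.range_succ_eq_map]
    simp only [List.flatMap_cons, List.flatMap_map, Nat.succ_eq_add_one, col_succ]
    rw [ih _ htail, col_zero]
    by_cases hany : qs.any (fun q => !q.isEmpty) = true
    · obtain ⟨s, hs⟩ : ∃ s, pvSumLen qs = s + 1 :=
        ⟨pvSumLen qs - 1, by have := (anyNE_iff qs).mp hany; omega⟩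
      rw [hs]
      simp only [colFlatF, hany, if_true]
      congr 1
      have hst := sumLen_tails qs
      have hl1 := heads_len_pos qs hany
      exact colFlatF_fuel _ s _ (le_refl _) (by omega)
    · have h2 : qs.any (fun q => !q.isEmpty) = false := Bool.eq_false_iff.mpr hany
      have hz : pvSumLen qs = 0 := by
        by_contra hnz
        exact absurd ((anyNE_iff qs).mpr hnz) (by simp [h2])
      have hz2 : pvSumLen (qs.map List.tail) = 0 := by
        have := sumLen_tails qs; omega
      rw [hz, hz2]
      simp [colFlatF, heads_nil qs h2]

lemma foldl_max_ge (xs : List Nat) (a : Nat) : ∀ b ∈ xs, b ≤ xs.foldl max a := by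
  induction xs generalizing a with
  | nil => simp
  | cons x xs ih =>
    intro b hb
    simp at hb
    rcases hb with rfl | hb
    · calc b ≤ max a b := le_max_right a b
        _ ≤ (xs.foldl max (max a b)) := by
          clear ih; induction xs generalizing a b with
          | nil => simp
          | cons y ys ih2 => simp only [List.foldl_cons]; exact le_trans (le_max_left _ _) (ih2 _ _)
    · exact ih (max a x) b hb

theorem get_top_k_items_spec : Claim_equal_get_top_k_items := by
  intro item_lists K _
  unfold Spec_get_top_k_items get_top_k_items get_top_k_items_alt
  rw [loopA_eq K _ item_lists [] (by omega)]
  simp only [List.nil_append, List.length_nil, Nat.sub_zero]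
  by_cases hK : K ≤ 0
  · have : K.toNat = 0 := by omega
    simp [hK, this]
  · rw [if_neg hK]
    rw [flatRange_eq _ item_lists (by
      intro l hl
      have := foldl_max_ge (item_lists.map List.length) 0 l.length (by simp; exact ⟨l, hl, rfl⟩)
      exact this)]
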